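-- pv_equiv track=rewrite | github.com/roydonders/generative-composer | geneticmidisnapshot.py | group_into_phrases
-- ===== SOURCE A (Python) =====
-- def group_into_phrases(notes, rhythm, phrase_length=4):
--     """Group a flat list of notes into phrases of fixed length, preserving rests."""
--     phrases = []
--     current_phrase = []
--     current_rhythm = []
--     for note, rest in zip(notes, rhythm):
--         current_phrase.append(note)
--         current_rhythm.append(rest)
--         if len(current_phrase) >= phrase_length:
--             phrases.append((current_phrase, current_rhythm))
--             current_phrase = []
--             current_rhythm = []
--     if current_phrase:
--         phrases.append((current_phrase, current_rhythm))
--     return phrases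
-- ===== SOURCE B (Python) =====
-- def group_into_phrases(notes, rhythm, phrase_length=4):
--     """Group a flat list of notes into phrases of fixed length, preserving rests."""
--     paired = list(zip(notes, rhythm))
--     step = phrase_length if phrase_length > 0 else 1
--     phrases = []
--     while paired:
--         chunk, paired = paired[:step], paired[step:]
--         phrases.append(([n for n, _ in chunk], [r for _, r in chunk]))
--     return phrases
-- ===== Notes on version B (the rewrite author's own statement) =====
-- stated objective: simpler
-- what changed: Replaces the element-by-element buffer accumulator with a loop that repeatedly slices a whole phrase off the zipped list (non-positive phrase_length naturally becomes chunk size 1).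
import Mathlib
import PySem

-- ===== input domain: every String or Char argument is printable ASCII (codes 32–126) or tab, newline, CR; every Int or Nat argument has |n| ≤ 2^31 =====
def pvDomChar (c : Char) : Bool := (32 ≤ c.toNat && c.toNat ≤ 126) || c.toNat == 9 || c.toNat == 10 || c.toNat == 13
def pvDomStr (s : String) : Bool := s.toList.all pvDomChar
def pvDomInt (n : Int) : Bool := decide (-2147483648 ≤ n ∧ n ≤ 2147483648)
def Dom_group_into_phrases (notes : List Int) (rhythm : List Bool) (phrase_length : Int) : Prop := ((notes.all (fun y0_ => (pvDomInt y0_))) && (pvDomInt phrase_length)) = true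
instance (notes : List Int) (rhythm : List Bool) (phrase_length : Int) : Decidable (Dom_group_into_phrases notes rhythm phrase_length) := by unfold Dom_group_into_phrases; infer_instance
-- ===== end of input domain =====

-- B replaces A's element-by-element buffer accumulator with a loop slicing whole phrases
-- off the zipped list (objective: simpler decomposition; same O(n) cost).

-- ===== PORT A =====
-- A's for-loop over zip(notes, rhythm) with state (phrases, current_phrase, current_rhythm),
-- then the final flush of a nonempty buffer.
def group_into_phrases (notes : List Int) (rhythm : List Bool) (phrase_length : Int) : List (List Int × List Bool) :=
  let st := (notes.zip rhythm).foldl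
    (fun (acc : List (List Int × List Bool) × List Int × List Bool) nr =>
      let cp := acc.2.1 ++ [nr.1]
      let cr := acc.2.2 ++ [nr.2]
      if (cp.length : Int) ≥ phrase_length then (acc.1 ++ [(cp, cr)], ([] : List Int), ([] : List Bool))
      else (acc.1, cp, cr))
    ([], [], [])
  if st.2.1 ≠ [] then st.1 ++ [(st.2.1, st.2.2)] else st.1

-- ===== PORT B =====
-- B's while-loop: slice a chunk of `step` pairs off the front until the list is empty.
-- `step ≥ 1` always holds by construction, so Python's slices paired[:step] / paired[step:]
-- are exactly List.take / List.drop with the nonnegative index step = (s+1); we carry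
-- s = step - 1 as a Nat so the chunk size is s+1.
def pvGoB (s : Nat) : List (Int × Bool) → List (List Int × List Bool)
  | [] => []
  | x :: t =>
    let chunk := (x :: t).take (s + 1)
    (chunk.map Prod.fst, chunk.map Prod.snd) :: pvGoB s (t.drop s)
termination_by l => l.length
decreasing_by simp [List.length_drop]

def group_into_phrases_alt (notes : List Int) (rhythm : List Bool) (phrase_length : Int) : List (List Int × List Bool) :=
  let paired := notes.zip rhythm
  let step : Int := if phrase_length > 0 then phrase_length else 1
  pvGoB (step - 1).toNat paired

-- ===== PRECONDITION & SPEC =====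
def Spec_group_into_phrases (notes : List Int) (rhythm : List Bool) (phrase_length : Int) (out : List (List Int × List Bool)) : Prop := out = group_into_phrases_alt notes rhythm phrase_length
instance (notes : List Int) (rhythm : List Bool) (phrase_length : Int) (out : List (List Int × List Bool)) : Decidable (Spec_group_into_phrases notes rhythm phrase_length out) := by unfold Spec_group_into_phrases; infer_instance

-- ===== CLAIM (what is proved, stated in full; the proofs are below) =====
def Claim_equal_group_into_phrases : Prop := ∀ (notes : List Int) (rhythm : List Bool) (phrase_length : Int), Dom_group_into_phrases notes rhythm phrase_length → Spec_group_into_phrases notes rhythm phrase_length (group_into_phrases notes rhythm phrase_length)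

-- ===== LEMMAS AND PROOFS =====

-- Recursive characterisation of A's loop+flush, parametrised by the buffer state.
def pvChunkFrom (pl : Int) (cp : List Int) (cr : List Bool) : List (Int × Bool) → List (List Int × List Bool)
  | [] => if cp ≠ [] then [(cp, cr)] else []
  | nr :: t =>
      if ((cp.length : Int) + 1 : Int) ≥ pl then
        (cp ++ [nr.1], cr ++ [nr.2]) :: pvChunkFrom pl [] [] t
      else pvChunkFrom pl (cp ++ [nr.1]) (cr ++ [nr.2]) t

theorem pvA_fold_eq (pl : Int) (l : List (Int × Bool)) :
    ∀ (acc : List (List Int × List Bool)) (cp : List Int) (cr : List Bool),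
    (let st := l.foldl
        (fun (acc : List (List Int × List Bool) × List Int × List Bool) nr =>
          let cp := acc.2.1 ++ [nr.1]
          let cr := acc.2.2 ++ [nr.2]
          if (cp.length : Int) ≥ pl then (acc.1 ++ [(cp, cr)], ([] : List Int), ([] : List Bool))
          else (acc.1, cp, cr))
        (acc, cp, cr)
      if st.2.1 ≠ [] then st.1 ++ [(st.2.1, st.2.2)] else st.1)
    = acc ++ pvChunkFrom pl cp cr l := by
  induction l with
  | nil =>
    intro acc cp cr
    simp only [List.foldl_nil, pvChunkFrom]
    split <;> simp_all
  | cons nr t ih =>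
    intro acc cp cr
    simp only [List.foldl_cons, pvChunkFrom]
    by_cases h : ((cp.length : Int) + 1 : Int) ≥ pl
    · have h' : ((cp ++ [nr.1]).length : Int) ≥ pl := by simpa using h
      simp only [if_pos h, if_pos h']
      rw [ih]
      simp
    · have h' : ¬ ((cp ++ [nr.1]).length : Int) ≥ pl := by simpa using h
      simp only [if_neg h, if_neg h']
      exact ih acc (cp ++ [nr.1]) (cr ++ [nr.2])

-- non-positive phrase_length: A flushes each element individually = chunk size 1
theorem pvChunkFrom_nonpos (pl : Int) (hpl : pl ≤ 0) :
    ∀ l : List (Int × Bool), pvChunkFrom pl [] [] l = pvGoB 0 l := by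
  intro l
  induction l with
  | nil => rw [pvGoB]; simp [pvChunkFrom]
  | cons x t ih =>
    rw [pvGoB]
    simp only [pvChunkFrom]
    rw [if_pos (by simpa using le_trans hpl (by omega))]
    simp [ih]

-- filling lemma for positive pl
theorem pvChunkFrom_fill (pl : Int) (hpl : 1 ≤ pl) :
    ∀ (l : List (Int × Bool)) (cp : List Int) (cr : List Bool),
    (cp.length : Int) < pl →
    pvChunkFrom pl cp cr l =
      if l.length + cp.length < pl.toNat then
        (if cp = [] ∧ l = [] then [] else [(cp ++ l.map Prod.fst, cr ++ l.map Prod.snd)])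
      else (cp ++ (l.take (pl.toNat - cp.length)).map Prod.fst,
            cr ++ (l.take (pl.toNat - cp.length)).map Prod.snd)
            :: pvChunkFrom pl [] [] (l.drop (pl.toNat - cp.length)) := by
  intro l
  induction l with
  | nil =>
    intro cp cr hlt
    have : (0 : Nat) + cp.length < pl.toNat := by omega
    rw [if_pos (by simpa using this)]
    simp only [pvChunkFrom]
    by_cases hcp : cp = [] <;> simp [hcp]
  | cons nr t ih =>
    intro cp cr hlt
    simp only [pvChunkFrom]
    by_cases h : ((cp.length : Int) + 1 : Int) ≥ pl
    · -- chunk completes now: cp.length + 1 = pl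
      have hcl : (cp.length : Int) + 1 = pl := by omega
      have hm : pl.toNat - cp.length = 1 := by omega
      have hnc : ¬ ((nr :: t).length + cp.length < pl.toNat) := by
        simp only [List.length_cons]; omega
      rw [if_pos h, if_neg hnc, hm]
      simp
    · have hlt' : ((cp ++ [nr.1]).length : Int) < pl := by
        simp only [List.length_append, List.length_cons, List.length_nil]
        push_cast; omega
      rw [if_neg h, ih (cp ++ [nr.1]) (cr ++ [nr.2]) hlt']
      have hm : pl.toNat - cp.length = (pl.toNat - (cp ++ [nr.1]).length) + 1 := by
        simp only [List.length_append, List.length_cons, List.length_nil]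
        omega
      have hcond : (t.length + (cp ++ [nr.1]).length < pl.toNat)
          ↔ ((nr :: t).length + cp.length < pl.toNat) := by
        simp only [List.length_append, List.length_cons, List.length_nil]; omega
      by_cases hc : t.length + (cp ++ [nr.1]).length < pl.toNat
      · rw [if_pos hc, if_pos (hcond.mp hc)]
        have : ¬ (cp ++ [nr.1] = [] ∧ t = []) := by simp
        rw [if_neg this]
        have : ¬ (cp = [] ∧ nr :: t = []) := by simp
        rw [if_neg this]
        simp
      · rw [if_neg hc, if_neg (fun h' => hc (hcond.mpr h'))]
        rw [hm]
        simp [List.take_succ_cons, List.drop_succ_cons]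

-- positive phrase_length: A's chunking = B's slicing, by strong induction on length
theorem pvChunkFrom_pos (pl : Int) (hpl : 1 ≤ pl) :
    ∀ (n : Nat) (l : List (Int × Bool)), l.length ≤ n → pvChunkFrom pl [] [] l = pvGoB (pl - 1).toNat l := by
  intro n
  induction n with
  | zero =>
    intro l hl
    have : l = [] := by cases l <;> simp_all
    subst this
    rw [pvGoB]; simp [pvChunkFrom]
  | succ n ih =>
    intro l hl
    cases l with
    | nil => rw [pvGoB]; simp [pvChunkFrom]
    | cons x t =>
      rw [pvGoB]
      rw [pvChunkFrom_fill pl hpl (x :: t) [] [] (by simpa using hpl)]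
      have hs1 : (pl - 1).toNat + 1 = pl.toNat := by omega
      by_cases hc : (x :: t).length + ([] : List Int).length < pl.toNat
      · rw [if_pos hc]
        have hne : ¬ (([] : List Int) = [] ∧ x :: t = []) := by simp
        rw [if_neg hne]
        have htake : (x :: t).take ((pl - 1).toNat + 1) = x :: t := by
          apply List.take_of_length_le; simp at hc ⊢; omega
        have hdrop : t.drop (pl - 1).toNat = [] := by
          apply List.drop_eq_nil_of_le; simp at hc ⊢; omega
        rw [htake, hdrop, pvGoB]
        simp
      · rw [if_neg hc]
        simp only [List.length_nil, Nat.sub_zero, List.nil_append]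
        have hdec : ((x :: t).drop pl.toNat).length < (x :: t).length := by
          simp only [List.length_drop, List.length_cons]
          simp only [List.length_nil] at hc
          omega
        rw [ih _ (by simp only [List.length_cons] at hl; simp [List.length_drop]; omega)]
        have hdrop : (x :: t).drop pl.toNat = t.drop (pl - 1).toNat := by
          rw [← hs1]; simp [List.drop_succ_cons]
        rw [hdrop, hs1]

-- ===== VERDICT (by name: the statement is the Claim_ definition above) =====
theorem group_into_phrases_spec : Claim_equal_group_into_phrases := by
  intro notes rhythm pl _
  unfold Spec_group_into_phrases group_into_phrases group_into_phrases_alt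
  rw [pvA_fold_eq pl (notes.zip rhythm) [] [] []]
  simp only [List.nil_append]
  by_cases hpl : 1 ≤ pl
  · rw [if_pos (by omega : pl > 0), pvChunkFrom_pos pl hpl (notes.zip rhythm).length _ le_rfl]
  · rw [if_neg (by omega : ¬ pl > 0), pvChunkFrom_nonpos pl (by omega)]
    norm_num
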